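-- pv_equiv track=rewrite | github.com/Glebias/Support-System | lab3/main.py | expand_implicant
-- ===== SOURCE A (Python) =====
-- from itertools import product, combinations
--
-- def expand_implicant(implicant_str):
--     vars_combinations = [
--         ''.join(bits) for bits in product('01', repeat=implicant_str.count('X'))
--     ]
--     results = []
--     for bits in vars_combinations:
--         term = list(implicant_str)
--         bit_index = 0
--         for i, ch in enumerate(implicant_str):
--             if ch == 'X':
--                 term[i] = bits[bit_index]
--                 bit_index += 1
--         results.append(''.join(term))
--     return results
-- ===== SOURCE B (Python) =====
-- def expand_implicant(implicant_str):
--     results = ['']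
--     for ch in implicant_str:
--         if ch == 'X':
--             results = [p + b for p in results for b in '01']
--         else:
--             results = [p + ch for p in results]
--     return results
-- ===== Notes on version B (the rewrite author's own statement) =====
-- stated objective: simpler
-- what changed: Replaces A's two-phase approach (materialise all bit-tuples with itertools.product, then re-scan the whole string for each tuple to substitute) with a single left-to-right pass that grows the list of partial expansions, branching on both bit characters at each wildcard position.
import Mathlib
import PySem

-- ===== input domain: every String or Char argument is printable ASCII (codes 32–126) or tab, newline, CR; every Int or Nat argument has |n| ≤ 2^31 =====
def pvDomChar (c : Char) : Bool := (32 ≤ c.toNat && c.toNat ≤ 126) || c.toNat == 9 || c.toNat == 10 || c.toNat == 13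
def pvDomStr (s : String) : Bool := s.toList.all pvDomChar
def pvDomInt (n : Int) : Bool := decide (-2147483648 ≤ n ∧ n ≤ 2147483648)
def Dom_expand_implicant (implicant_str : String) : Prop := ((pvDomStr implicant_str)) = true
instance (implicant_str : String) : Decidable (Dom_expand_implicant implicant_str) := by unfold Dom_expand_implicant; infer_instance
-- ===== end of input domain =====

-- B replaces A's "enumerate all bit-tuples with product, then re-scan the string for each"
-- by a single left-to-right pass that grows the list of partial expansions (objective: simpler).

-- ===== PORT A =====
-- itertools.product('01', repeat=n), ported by its recurrence (first coordinate varies slowest)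
def pyProduct01 : Nat → List (List Char)
  | 0 => [[]]
  | n + 1 => (['0', '1']).flatMap (fun b => (pyProduct01 n).map (fun rest => b :: rest))

def expand_implicant (implicant_str : String) : List String :=
  let vars_combinations : List (List Char) :=
    pyProduct01 (PySem.Str.count implicant_str "X")
  let results : List String :=
    vars_combinations.foldl (fun results bits =>
      let term := implicant_str.toList
      let st := (PySem.List.enumerate implicant_str.toList).foldl
        (fun (st : List Char × Int) p =>
          if p.2 = 'X' then
            (PySem.List.pySetD st.1 p.1 (PySem.List.pyGetD bits st.2 'X'), st.2 + 1)
          else st) (term, 0)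
      results ++ [String.mk st.1]) []
  results

-- ===== PORT B =====
def expand_implicant_alt (implicant_str : String) : List String :=
  (implicant_str.toList.foldl (fun results ch =>
      if ch = 'X' then results.flatMap (fun p => ['0', '1'].map (fun b => p ++ [b]))
      else results.map (fun p => p ++ [ch])) [[]]).map String.mk

-- ===== PRECONDITION & SPEC =====
def Spec_expand_implicant (implicant_str : String) (out : List String) : Prop := out = expand_implicant_alt implicant_str
instance (implicant_str : String) (out : List String) : Decidable (Spec_expand_implicant implicant_str out) := by unfold Spec_expand_implicant; infer_instance

-- ===== CLAIM (what is proved, stated in full; the proofs are below) =====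
def Claim_equal_expand_implicant : Prop := ∀ (implicant_str : String), Dom_expand_implicant implicant_str → Spec_expand_implicant implicant_str (expand_implicant implicant_str)

-- ===== LEMMAS AND PROOFS =====

/-- The common recursive description of the expansion of a character list. -/
def pvExpand : List Char → List (List Char)
  | [] => [[]]
  | c :: cs =>
    if c = 'X' then (pvExpand cs).map ('0' :: ·) ++ (pvExpand cs).map ('1' :: ·)
    else (pvExpand cs).map (c :: ·)

/-- Substitution of A's inner loop, described recursively: replace each 'X' of `l`
by successive elements of `bits`, starting at index `b`. -/
def pvSubst (l : List Char) (bits : List Char) (b : Nat) : List Char :=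
  match l with
  | [] => []
  | c :: cs => if c = 'X' then bits.getD b 'X' :: pvSubst cs bits (b + 1) else c :: pvSubst cs bits b

theorem pvCountGo (l : List Char) (acc : Nat) :
    PySem.Chars.count.go ['X'] l.length l acc = acc + l.count 'X' := by
  induction l generalizing acc with
  | nil => simp [PySem.Chars.count.go]
  | cons h t ih =>
    rw [List.length_cons, PySem.Chars.count.go]
    by_cases hx : h = 'X'
    · subst hx
      simp only [List.isPrefixOf, BEq.rfl, Bool.true_and, if_true,
        List.length_cons, List.drop_succ_cons, List.length_nil, List.drop_zero]
      rw [ih]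
      simp
      omega
    · have : List.isPrefixOf ['X'] (h :: t) = false := by
        simp [List.isPrefixOf]
        exact fun h' => absurd h'.symm hx
      rw [this]
      simp only [Bool.false_eq_true, if_false]
      rw [ih]
      simp [hx]

theorem pvCountX (s : String) : PySem.Str.count s "X" = s.toList.count 'X' := by
  show PySem.Chars.count s.toList ['X'] = _
  rw [PySem.Chars.count]
  simp only [List.isEmpty_cons, Bool.false_eq_true, if_false]
  simpa using pvCountGo s.toList 0

theorem pvSubst_shift (l : List Char) (b : Char) (bits : List Char) (k : Nat) :
    pvSubst l (b :: bits) (k + 1) = pvSubst l bits k := by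
  induction l generalizing k with
  | nil => rfl
  | cons c cs ih => by_cases hc : c = 'X' <;> simp [pvSubst, hc, ih]

/-- A's inner loop computes `pvSubst`. -/
theorem pvInner (l pre bits : List Char) (b : Nat) :
    (PySem.List.enumerate l (pre.length : Int)).foldl
      (fun (st : List Char × Int) p =>
        if p.2 = 'X' then
          (PySem.List.pySetD st.1 p.1 (PySem.List.pyGetD bits st.2 'X'), st.2 + 1)
        else st) (pre ++ l, (b : Int))
    = (pre ++ pvSubst l bits b, ((b + l.count 'X' : Nat) : Int)) := by
  induction l generalizing pre b with
  | nil => simp [PySem.List.enumerate, pvSubst]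
  | cons c cs ih =>
    rw [PySem.List.enumerate_cons, List.foldl_cons]
    by_cases hc : c = 'X'
    · subst hc
      simp only [if_true, PySem.List.pySetD_natCast, PySem.List.pyGetD_natCast]
      have hset : (pre ++ 'X' :: cs).set pre.length (bits.getD b 'X')
          = (pre ++ [bits.getD b 'X']) ++ cs := by
        rw [List.set_append_right _ _ (le_refl _)]
        simp
      rw [hset]
      have hlen : (pre.length : Int) + 1 = (((pre ++ [bits.getD b 'X']).length : Nat) : Int) := by
        simp
      have hb : (b : Int) + 1 = ((b + 1 : Nat) : Int) := by push_cast; ring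
      rw [hlen, hb, ih (pre ++ [bits.getD b 'X']) (b + 1)]
      simp [pvSubst]
      omega
    · have hcb : ¬ ((c = 'X') = True) := by simp [hc]
      simp only [hc, if_false]
      have hsplit : pre ++ c :: cs = (pre ++ [c]) ++ cs := by simp
      have hlen : (pre.length : Int) + 1 = (((pre ++ [c]).length : Nat) : Int) := by simp
      rw [hsplit, hlen, ih (pre ++ [c]) b]
      simp [pvSubst, hc]

/-- A's result characterised via `pvExpand`. -/
theorem pvA_eq (l : List Char) :
    (pyProduct01 (l.count 'X')).map (fun bits => pvSubst l bits 0) = pvExpand l := by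
  induction l with
  | nil => simp [pyProduct01, pvSubst, pvExpand]
  | cons c cs ih =>
    by_cases hc : c = 'X'
    · subst hc
      have hcount : ('X' :: cs).count 'X' = cs.count 'X' + 1 := by simp
      rw [hcount]
      show ((['0', '1']).flatMap
          (fun b => (pyProduct01 (cs.count 'X')).map (fun rest => b :: rest))).map
          (fun bits => pvSubst ('X' :: cs) bits 0) = _
      simp only [List.flatMap_cons, List.flatMap_nil, List.append_nil, List.map_append,
        List.map_map]
      have key : ∀ b : Char, ((fun bits => pvSubst ('X' :: cs) bits 0) ∘ fun rest => b :: rest)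
          = (fun rest => b :: pvSubst cs rest 0) := by
        intro b
        funext rest
        simp [Function.comp, pvSubst, pvSubst_shift]
      rw [key '0', key '1']
      show (pyProduct01 (cs.count 'X')).map ((fun r => '0' :: r) ∘ fun bits => pvSubst cs bits 0)
          ++ (pyProduct01 (cs.count 'X')).map ((fun r => '1' :: r) ∘ fun bits => pvSubst cs bits 0)
          = _
      rw [← List.map_map, ← List.map_map, ih]
      simp [pvExpand]
    · have hcount : (c :: cs).count 'X' = cs.count 'X' := by simp [hc]
      rw [hcount]
      have key : (fun bits => pvSubst (c :: cs) bits 0)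
          = (fun r => c :: r) ∘ (fun bits => pvSubst cs bits 0) := by
        funext bits; simp [pvSubst, hc, Function.comp]
      rw [key, ← List.map_map, ih]
      simp [pvExpand, hc]

/-- B's fold characterised via `pvExpand`. -/
theorem pvB_eq (l : List Char) (acc : List (List Char)) :
    l.foldl (fun results ch =>
        if ch = 'X' then results.flatMap (fun p => ['0', '1'].map (fun b => p ++ [b]))
        else results.map (fun p => p ++ [ch])) acc
    = acc.flatMap (fun p => (pvExpand l).map (p ++ ·)) := by
  induction l generalizing acc with
  | nil => simp [pvExpand]
  | cons c cs ih =>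
    rw [List.foldl_cons]
    by_cases hc : c = 'X'
    · subst hc
      simp only [if_true]
      rw [ih, List.flatMap_assoc]
      congr 1
      funext p
      simp [pvExpand, List.map_map, Function.comp_def, List.append_assoc]
    · simp only [hc, if_false]
      rw [ih, List.flatMap_map]
      congr 1
      funext p
      simp [pvExpand, hc, List.map_map, Function.comp_def, List.append_assoc]

-- ===== VERDICT (by name: the statement is the Claim_ definition above) =====
theorem expand_implicant_spec : Claim_equal_expand_implicant := by
  intro s _
  show expand_implicant s = expand_implicant_alt s
  simp only [expand_implicant, expand_implicant_alt]
  rw [PySem.List.foldl_append_singleton_eq_map (fun bits =>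
    String.mk ((PySem.List.enumerate s.toList).foldl
      (fun (st : List Char × Int) p =>
        if p.2 = 'X' then
          (PySem.List.pySetD st.1 p.1 (PySem.List.pyGetD bits st.2 'X'), st.2 + 1)
        else st) (s.toList, 0)).1)]
  rw [pvB_eq]
  simp only [List.nil_append, List.flatMap_cons, List.flatMap_nil, List.append_nil,
    List.map_map, pvCountX]
  rw [← pvA_eq s.toList, List.map_map]
  congr 1
  funext bits
  have := pvInner s.toList [] bits 0
  simp only [List.nil_append, List.length_nil, Nat.cast_zero] at this
  simp [Function.comp, this]
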